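-- pv_equiv track=rewrite | github.com/KaurHarnoor/Visualizer-Helps-you-C | algorithms/binary_search.py | get_color_array_binary
-- ===== SOURCE A (Python) =====
-- def get_color_array_binary(length, left, mid, right, found=False):
--     color_array = []
--     for i in range(length):
--         if i == mid:
--             color_array.append("blue")
--         elif i >= left and i <= right:
--             color_array.append("grey")
--         else:
--             color_array.append("white")
--         if found and i == mid:
--             color_array[i] = "green"
--     return color_array
-- ===== SOURCE B (Python) =====
-- def get_color_array_binary(length, left, mid, right, found=False):
--     ca = ["white"] * length
--     for i in range(max(0, left), min(length, right + 1)):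
--         ca[i] = "grey"
--     if 0 <= mid < length:
--         ca[mid] = "green" if found else "blue"
--     return ca
-- ===== Notes on version B (the rewrite author's own statement) =====
-- stated objective: faster
-- what changed: Instead of classifying every index with per-element branching, B allocates the whole array as 'white', paints the clamped grey interval with one slice-range loop, and finally overwrites the mid cell; no per-index comparisons outside the grey band.
import Mathlib
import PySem

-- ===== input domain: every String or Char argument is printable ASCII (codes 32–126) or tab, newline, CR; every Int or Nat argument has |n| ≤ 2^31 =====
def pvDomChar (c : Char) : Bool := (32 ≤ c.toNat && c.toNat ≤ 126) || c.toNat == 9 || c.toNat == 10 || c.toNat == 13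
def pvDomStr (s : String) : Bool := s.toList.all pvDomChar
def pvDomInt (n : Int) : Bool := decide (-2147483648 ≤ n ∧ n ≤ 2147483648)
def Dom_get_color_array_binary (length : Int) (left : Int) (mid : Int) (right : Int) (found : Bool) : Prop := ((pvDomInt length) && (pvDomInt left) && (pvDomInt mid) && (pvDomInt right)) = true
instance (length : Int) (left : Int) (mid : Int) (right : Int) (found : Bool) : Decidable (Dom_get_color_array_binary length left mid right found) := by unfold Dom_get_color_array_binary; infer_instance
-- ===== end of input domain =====

-- B builds the array as all-"white", paints the clamped grey interval, then overwrites the mid cell;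
-- same return value as A's per-index classification loop.


-- ===== PORT A =====
def get_color_array_binary (length : Int) (left : Int) (mid : Int) (right : Int) (found : Bool) : List String :=
  (PySem.List.pyRange 0 length 1).foldl (fun color_array i =>
    let color_array :=
      if i = mid then color_array ++ ["blue"]
      else if left ≤ i ∧ i ≤ right then color_array ++ ["grey"]
      else color_array ++ ["white"]
    if found ∧ i = mid then color_array.set i.toNat "green" else color_array) []

-- ===== PORT B =====
def get_color_array_binary_alt (length : Int) (left : Int) (mid : Int) (right : Int) (found : Bool) : List String :=
  let ca := List.replicate length.toNat "white"
  let ca := (PySem.List.pyRange (max 0 left) (min length (right + 1)) 1).foldl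
      (fun ca i => ca.set i.toNat "grey") ca
  if 0 ≤ mid ∧ mid < length then ca.set mid.toNat (if found then "green" else "blue") else ca

-- ===== PRECONDITION & SPEC =====
def Spec_get_color_array_binary (length : Int) (left : Int) (mid : Int) (right : Int) (found : Bool) (out : List String) : Prop := out = get_color_array_binary_alt length left mid right found
instance (length : Int) (left : Int) (mid : Int) (right : Int) (found : Bool) (out : List String) : Decidable (Spec_get_color_array_binary length left mid right found out) := by unfold Spec_get_color_array_binary; infer_instance

-- ===== CLAIM (what is proved, stated in full; the proofs are below) =====
def Claim_equal_get_color_array_binary : Prop := ∀ (length : Int) (left : Int) (mid : Int) (right : Int) (found : Bool), Dom_get_color_array_binary length left mid right found → Spec_get_color_array_binary length left mid right found (get_color_array_binary length left mid right found)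

-- ===== LEMMAS AND PROOFS =====

-- the color A's loop body assigns to index k
def pvColorA (left mid right : Int) (found : Bool) (k : Nat) : String :=
  if found ∧ (k : Int) = mid then "green"
  else if (k : Int) = mid then "blue"
  else if left ≤ (k : Int) ∧ (k : Int) ≤ right then "grey"
  else "white"

lemma pvLA (left mid right : Int) (found : Bool) (n : Nat) :
    (PySem.List.pyRange 0 (n : Int) 1).foldl (fun color_array i =>
      let color_array :=
        if i = mid then color_array ++ ["blue"]
        else if left ≤ i ∧ i ≤ right then color_array ++ ["grey"]
        else color_array ++ ["white"]
      if found ∧ i = mid then color_array.set i.toNat "green" else color_array) []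
    = (List.range n).map (pvColorA left mid right found) := by
  induction n with
  | zero => simp [PySem.List.pyRange_one_eq_nil]
  | succ n ih =>
      have hc : ((n + 1 : Nat) : Int) = (n : Int) + 1 := by push_cast; ring
      rw [hc, PySem.List.pyRange_one_succ_right (by positivity), List.foldl_append, ih,
          List.range_succ, List.map_append]
      have hlen : ((List.range n).map (pvColorA left mid right found)).length = n := by simp
      have hset : ∀ s : String,
          (((List.range n).map (pvColorA left mid right found)) ++ [s]).set ((n : Int)).toNat "green"
          = ((List.range n).map (pvColorA left mid right found)) ++ ["green"] := by
        intro s; rw [List.set_append]; simp [hlen]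
      simp only [List.foldl_cons, List.foldl_nil]
      by_cases hm : (n : Int) = mid
      · rw [if_pos hm]
        by_cases hf : found
        · rw [if_pos ⟨hf, hm⟩, hset]
          simp [pvColorA, hm, hf]
        · rw [if_neg (by tauto)]
          simp [pvColorA, hm, hf]
      · rw [if_neg hm, if_neg (by tauto)]
        by_cases hr : left ≤ (n : Int) ∧ (n : Int) ≤ right
        · rw [if_pos hr]; simp [pvColorA, hm, hr]
        · rw [if_neg hr]; simp [pvColorA, hm, hr]

lemma pvPaint (b : Int) : ∀ (k : Nat) (a : Int) (l : List String), 0 ≤ a → (b - a).toNat ≤ k →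
    (PySem.List.pyRange a b 1).foldl (fun ca i => ca.set i.toNat "grey") l
    = l.mapIdx (fun j s => if a ≤ (j : Int) ∧ (j : Int) < b then "grey" else s) := by
  intro k
  induction k with
  | zero =>
      intro a l ha hk
      have hb : b ≤ a := by omega
      rw [PySem.List.pyRange_one_eq_nil hb]
      refine (List.ext_getElem (by simp) ?_).symm
      intro j h1 h2
      simp only [List.foldl_nil, List.getElem_mapIdx]
      rw [if_neg (by omega)]
  | succ k ih =>
      intro a l ha hk
      by_cases hab : a < b
      · rw [PySem.List.pyRange_one_cons hab]
        simp only [List.foldl_cons]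
        rw [ih (a + 1) (l.set a.toNat "grey") (by omega) (by omega)]
        refine List.ext_getElem (by simp) ?_
        intro j h1 h2
        simp only [List.getElem_mapIdx, List.getElem_set]
        split_ifs <;> first | rfl | omega
      · rw [PySem.List.pyRange_one_eq_nil (by omega)]
        refine (List.ext_getElem (by simp) ?_).symm
        intro j h1 h2
        simp only [List.foldl_nil, List.getElem_mapIdx]
        rw [if_neg (by omega)]

lemma pvRangeCast (length : Int) :
    PySem.List.pyRange 0 length 1 = PySem.List.pyRange 0 ((length.toNat : Nat) : Int) 1 := by
  by_cases h : 0 ≤ length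
  · rw [Int.toNat_of_nonneg h]
  · rw [PySem.List.pyRange_one_eq_nil (by omega), PySem.List.pyRange_one_eq_nil (by omega)]

-- ===== VERDICT (by name: the statement is the Claim_ definition above) =====
theorem get_color_array_binary_spec : Claim_equal_get_color_array_binary := by
  intro length left mid right found _
  unfold Spec_get_color_array_binary get_color_array_binary get_color_array_binary_alt
  rw [pvRangeCast, pvLA]
  dsimp only
  rw [pvPaint (min length (right + 1)) (min length (right + 1) - max 0 left).toNat (max 0 left)
      (List.replicate length.toNat "white") (by omega) (le_refl _)]
  by_cases hm : 0 ≤ mid ∧ mid < length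
  · rw [if_pos hm]
    refine List.ext_getElem (by simp) ?_
    intro j h1 h2
    simp only [List.getElem_map, List.getElem_range, List.getElem_set, List.getElem_mapIdx,
      List.getElem_replicate, pvColorA]
    have hjn : j < length.toNat := by simpa using h1
    cases found <;> simp only [Bool.false_eq_true, false_and, if_false, true_and] <;> split_ifs <;> first | rfl | omega
  · rw [if_neg hm]
    refine List.ext_getElem (by simp) ?_
    intro j h1 h2
    simp only [List.getElem_map, List.getElem_range, List.getElem_mapIdx,
      List.getElem_replicate, pvColorA]
    have hjn : j < length.toNat := by simpa using h1
    by_cases hf : found <;> split_ifs <;> first | rfl | omega
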